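-- pv_equiv track=rewrite | github.com/nkossally/leet_code | Python/2731. Movement of Robots.py | sumDistanceFaster
-- ===== SOURCE A (Python) =====
-- from typing import List
--
-- def sumDistanceFaster(nums: List[int], s: str, d: int) -> int:
--     def get_mod(num):
--         return num % (10 ** 9 + 7)
--
--     for i in range(len(nums)):
--         if s[i] == "R":
--             nums[i] += d
--         else:
--             nums[i] -= d
--
--     res = 0
--     for i in range(len(nums)):
--         for j in range(i + 1, len(nums)):
--             res += abs(nums[i] - nums[j])
--     return get_mod(res)
-- ===== SOURCE B (Python) =====
-- def sumDistanceFaster(nums, s, d):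
--     # Sort the moved positions; on a sorted list every |a_i - a_j| (i < j) is a_j - a_i,
--     # so each element's total contribution is x*k - (sum of the k earlier elements).
--     # Note: unlike A, this does not mutate nums in place (return value is the same).
--     moved = sorted((x + d) if c == "R" else (x - d) for x, c in zip(nums, s))
--     res = 0
--     pre = 0
--     for k, x in enumerate(moved):
--         res += x * k - pre
--         pre += x
--     return res % (10 ** 9 + 7)
-- ===== Notes on version B (the rewrite author's own statement) =====
-- stated objective: faster
-- what changed: Replaces the O(n^2) double loop over all index pairs by sorting the moved positions and accumulating each element's contribution with a running prefix sum and count.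
import Mathlib
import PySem

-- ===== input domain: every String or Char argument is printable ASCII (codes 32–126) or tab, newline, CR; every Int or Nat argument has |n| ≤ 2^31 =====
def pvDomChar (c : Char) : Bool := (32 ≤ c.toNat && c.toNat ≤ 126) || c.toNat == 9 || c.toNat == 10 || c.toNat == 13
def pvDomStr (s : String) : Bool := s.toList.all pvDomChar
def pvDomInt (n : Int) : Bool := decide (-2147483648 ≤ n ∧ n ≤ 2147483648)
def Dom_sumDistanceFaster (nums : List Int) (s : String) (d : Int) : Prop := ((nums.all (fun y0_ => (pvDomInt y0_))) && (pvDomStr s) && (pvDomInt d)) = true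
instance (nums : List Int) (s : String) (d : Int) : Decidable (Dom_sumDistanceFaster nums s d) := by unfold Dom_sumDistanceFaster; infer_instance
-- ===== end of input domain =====

-- B replaces A's O(n^2) double loop by sorting the moved positions and accumulating
-- contributions with a running prefix sum (objective: faster). A mutates nums in place,
-- B does not; the equivalence proved here is about the return value only.

-- ===== PORT A =====
def sumDistanceFaster (nums : List Int) (s : String) (d : Int) : Int :=
  -- first loop: nums[i] += d / -= d according to s[i]; s[i] is exact under Pre_ (the
  -- default ' ' of getD is unreachable there, Python raises IndexError outside Pre_)
  let moved : List Int :=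
    (PySem.List.pyRange 0 (nums.length : Int)).map (fun i =>
      if (PySem.Str.pyGet? s i).getD ' ' = 'R'
      then PySem.List.pyGetD nums i 0 + d
      else PySem.List.pyGetD nums i 0 - d)
  -- double loop over index pairs i < j
  let res : Int :=
    (PySem.List.pyRange 0 (nums.length : Int)).foldl (fun res i =>
      (PySem.List.pyRange (i + 1) (nums.length : Int)).foldl (fun res j =>
        res + |PySem.List.pyGetD moved i 0 - PySem.List.pyGetD moved j 0|) res) 0
  PySem.Int.mod res (10 ^ 9 + 7)

-- ===== PORT B =====
def sumDistanceFaster_alt (nums : List Int) (s : String) (d : Int) : Int :=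
  let moved : List Int :=
    PySem.List.sorted
      ((nums.zip s.toList).map (fun p => if p.2 = 'R' then p.1 + d else p.1 - d))
      (fun x => x) false
  -- state = (k, pre, res): enumerate index, prefix sum, accumulated result
  let st : Int × Int × Int :=
    moved.foldl (fun st x => (st.1 + 1, st.2.1 + x, st.2.2 + x * st.1 - st.2.1)) (0, 0, 0)
  PySem.Int.mod st.2.2 (10 ^ 9 + 7)

-- ===== PRECONDITION & SPEC =====
-- Pre_ excludes inputs with len(s) < len(nums), on which A raises IndexError at s[i].
def Pre_sumDistanceFaster (nums : List Int) (s : String) (d : Int) : Prop :=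
  nums.length ≤ s.toList.length
instance (nums : List Int) (s : String) (d : Int) : Decidable (Pre_sumDistanceFaster nums s d) := by unfold Pre_sumDistanceFaster; infer_instance

def pvWitness_sumDistanceFaster : List Int × String × Int := ([1, -2, 4], "RLR", 3)

def Spec_sumDistanceFaster (nums : List Int) (s : String) (d : Int) (out : Int) : Prop := out = sumDistanceFaster_alt nums s d
instance (nums : List Int) (s : String) (d : Int) (out : Int) : Decidable (Spec_sumDistanceFaster nums s d out) := by unfold Spec_sumDistanceFaster; infer_instance

-- ===== CLAIM (what is proved, stated in full; the proofs are below) =====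
def Claim_equal_sumDistanceFaster : Prop := ∀ (nums : List Int) (s : String) (d : Int), Dom_sumDistanceFaster nums s d → Pre_sumDistanceFaster nums s d → Spec_sumDistanceFaster nums s d (sumDistanceFaster nums s d)

-- ===== LEMMAS AND PROOFS =====

-- sum over all pairs i < j of |x_i - x_j|, recursively on the list
def pairAbs : List Int → Int
  | [] => 0
  | x :: xs => (xs.map fun y => |x - y|).sum + pairAbs xs

-- the same sum without the absolute value (equal to pairAbs on a sorted list)
def pairDiff : List Int → Int
  | [] => 0
  | x :: xs => (xs.map fun y => y - x).sum + pairDiff xs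

theorem pairAbs_perm {l l' : List Int} (h : l.Perm l') : pairAbs l = pairAbs l' := by
  induction h with
  | nil => rfl
  | cons x h ih =>
      simp only [pairAbs, ih, (h.map fun y => |x - y|).sum_eq]
  | swap x y l =>
      simp only [pairAbs, List.map_cons, List.sum_cons]
      rw [abs_sub_comm y x]; ring
  | trans _ _ ih1 ih2 => exact ih1.trans ih2

theorem pairAbs_of_pairwise : ∀ {l : List Int}, l.Pairwise (· ≤ ·) → pairAbs l = pairDiff l := by
  intro l h
  induction l with
  | nil => rfl
  | cons x xs ih =>
      rcases List.pairwise_cons.mp h with ⟨hx, ht⟩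
      simp only [pairAbs, pairDiff, ih ht]
      congr 1
      refine congrArg List.sum (List.map_congr_left fun y hy => ?_)
      rw [abs_sub_comm, abs_of_nonneg (by have := hx y hy; omega)]

theorem sorted_pairwise_le (l : List Int) :
    (PySem.List.sorted l (fun x => x) false).Pairwise (· ≤ ·) := by
  rw [List.pairwise_iff_getElem]
  intro i j hi hj hij
  exact PySem.List.sorted_id_getElem_mono l (Nat.le_of_lt hij) hj

theorem sum_map_sub (xs : List Int) (x : Int) :
    (xs.map fun y => y - x).sum = xs.sum - (xs.length : Int) * x := by
  induction xs with
  | nil => simp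
  | cons z zs ihz =>
      rw [List.map_cons, List.sum_cons, List.sum_cons, List.length_cons, ihz]
      push_cast; ring

-- B's loop: res accumulates Σ x*k - prefix = pairDiff
theorem bloop_eq (l : List Int) : ∀ (k pre res : Int),
    (l.foldl (fun st x => (st.1 + 1, st.2.1 + x, st.2.2 + x * st.1 - st.2.1))
      ((k, pre, res) : Int × Int × Int)).2.2
      = res + k * l.sum - (l.length : Int) * pre + pairDiff l := by
  induction l with
  | nil => intro k pre res; simp [pairDiff]
  | cons x xs ih =>
      intro k pre res
      rw [List.foldl_cons, ih, List.sum_cons, List.length_cons, pairDiff, sum_map_sub]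
      push_cast; ring

-- A's inner loop: fold over range(k, len) summed through indices = sum over drop k
theorem innerA (l : List Int) (a : Int) : ∀ (n k : Nat) (r : Int), l.length - k = n →
    (PySem.List.pyRange (k : Int) (l.length : Int)).foldl
      (fun r j => r + |a - PySem.List.pyGetD l j 0|) r
      = r + ((l.drop k).map fun y => |a - y|).sum := by
  intro n
  induction n with
  | zero =>
      intro k r hk
      have hlen : l.length ≤ k := by omega
      have : ¬ ((k : Int) < (l.length : Int)) := by exact_mod_cast not_lt.mpr hlen
      rw [show PySem.List.pyRange (k : Int) (l.length : Int) = [] by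
        simp [PySem.List.pyRange, this]]
      simp [List.drop_eq_nil_of_le hlen]
  | succ n ih =>
      intro k r hk
      have hklt : k < l.length := by omega
      rw [PySem.List.pyRange_one_cons (by exact_mod_cast hklt), List.foldl_cons]
      rw [show ((k : Int) + 1) = ((k + 1 : Nat) : Int) by push_cast; ring]
      rw [ih (k + 1) _ (by omega)]
      rw [PySem.List.pyGetD_eq_getElem l 0 (by positivity) (by exact_mod_cast hklt)]
      rw [List.drop_eq_getElem_cons hklt]
      simp only [List.map_cons, List.sum_cons, Int.toNat_natCast]
      ring

-- A's outer loop over range(k, len) = pairAbs of the suffix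
theorem outerA (l : List Int) : ∀ (n k : Nat) (r : Int), l.length - k = n →
    (PySem.List.pyRange (k : Int) (l.length : Int)).foldl (fun r i =>
      (PySem.List.pyRange (i + 1) (l.length : Int)).foldl (fun r j =>
        r + |PySem.List.pyGetD l i 0 - PySem.List.pyGetD l j 0|) r) r
      = r + pairAbs (l.drop k) := by
  intro n
  induction n with
  | zero =>
      intro k r hk
      have hlen : l.length ≤ k := by omega
      have : ¬ ((k : Int) < (l.length : Int)) := by exact_mod_cast not_lt.mpr hlen
      rw [show PySem.List.pyRange (k : Int) (l.length : Int) = [] by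
        simp [PySem.List.pyRange, this]]
      simp [List.drop_eq_nil_of_le hlen, pairAbs]
  | succ n ih =>
      intro k r hk
      have hklt : k < l.length := by omega
      rw [PySem.List.pyRange_one_cons (by exact_mod_cast hklt), List.foldl_cons]
      rw [show ((k : Int) + 1) = ((k + 1 : Nat) : Int) by push_cast; ring]
      rw [innerA l (PySem.List.pyGetD l (k : Int) 0) (l.length - (k + 1)) (k + 1) r rfl]
      rw [ih (k + 1) _ (by omega)]
      rw [List.drop_eq_getElem_cons hklt]
      simp only [pairAbs]
      rw [PySem.List.pyGetD_eq_getElem l 0 (by positivity) (by exact_mod_cast hklt)]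
      simp only [Int.toNat_natCast]
      ring

theorem outerA0 (l : List Int) (r : Int) :
    (PySem.List.pyRange 0 (l.length : Int)).foldl (fun r i =>
      (PySem.List.pyRange (i + 1) (l.length : Int)).foldl (fun r j =>
        r + |PySem.List.pyGetD l i 0 - PySem.List.pyGetD l j 0|) r) r
      = r + pairAbs l := by
  have h := outerA l l.length 0 r rfl
  simpa using h

-- A's first loop builds exactly B's pre-sort list (under Pre_)
theorem movedA_eq (nums : List Int) (s : String) (d : Int)
    (h : nums.length ≤ s.toList.length) :
    (PySem.List.pyRange 0 (nums.length : Int)).map (fun i =>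
      if (PySem.Str.pyGet? s i).getD ' ' = 'R'
      then PySem.List.pyGetD nums i 0 + d
      else PySem.List.pyGetD nums i 0 - d)
    = (nums.zip s.toList).map (fun p => if p.2 = 'R' then p.1 + d else p.1 - d) := by
  rw [PySem.List.pyRange_zero_natCast, List.map_map]
  apply List.ext_getElem
  · have h' : nums.length ≤ s.length := by simpa using h
    simp [List.length_zip]; omega
  · intro i hi hi'
    have hilen : i < nums.length := by simpa using hi
    have his : i < s.toList.length := by omega
    simp only [List.getElem_map, Function.comp, List.getElem_range, List.getElem_zip]
    rw [PySem.List.pyGetD_eq_getElem nums 0 (by positivity) (by exact_mod_cast hilen)]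
    rw [show PySem.Str.pyGet? s (i : Int) = PySem.Chars.pyGet? s.toList (i : Int) from rfl]
    rw [show PySem.Chars.pyGet? s.toList (i : Int) = PySem.List.pyGet? s.toList (i : Int) from rfl]
    rw [PySem.List.pyGet?_natCast, List.getElem?_eq_getElem his]
    simp [Int.toNat_natCast]

-- ===== VERDICT (by name: the statement is the Claim_ definition above) =====
theorem sumDistanceFaster_spec : Claim_equal_sumDistanceFaster := by
  intro nums s d _hdom hpre
  unfold Spec_sumDistanceFaster sumDistanceFaster sumDistanceFaster_alt
  simp only []
  rw [movedA_eq nums s d hpre]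
  set m : List Int :=
    (nums.zip s.toList).map (fun p => if p.2 = 'R' then p.1 + d else p.1 - d) with hm
  have hlen : nums.length = m.length := by
    have h' : nums.length ≤ s.length := by simpa using hpre
    simp [hm, List.length_zip]; omega
  rw [show (nums.length : Int) = (m.length : Int) by exact_mod_cast hlen]
  rw [outerA0 m 0]
  rw [bloop_eq]
  congr 1
  have hperm := PySem.List.sorted_perm m (fun x => x) false
  rw [← pairAbs_of_pairwise (sorted_pairwise_le m), pairAbs_perm hperm]
  simp
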